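-- pv_equiv track=rewrite | github.com/mtakeshi1/djangosample | cardapio_parser.py | split_meal
-- ===== SOURCE A (Python) =====
-- from typing import List, Optional
--
-- def split_meal(s: str, candidates: List[str]) -> List[str]:
--     for c in candidates:
--         i = s.lower().find(c)
--         if i > 0:
--             before = split_meal(s[:i], candidates)
--             after = split_meal(s[i:], candidates)
--             return before + after
--     return [s]
-- ===== SOURCE B (Python) =====
-- from typing import List
--
-- def split_meal(s: str, candidates: List[str]) -> List[str]:
--     result = []
--     stack = [s]
--     while stack:
--         seg = stack.pop()
--         low = seg.lower()
--         for c in candidates: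
--             i = low.find(c)
--             if i > 0:
--                 stack.append(seg[i:])
--                 stack.append(seg[:i])
--                 break
--         else:
--             result.append(seg)
--     return result
-- ===== Notes on version B (the rewrite author's own statement) =====
-- stated objective: alternative
-- what changed: Replaces the tree recursion (recursive calls on both halves, concatenating their results) with an iterative explicit-stack DFS that pushes the two halves and appends leaves to an accumulator, yielding the same pre-order leaves without recursion.
import Mathlib
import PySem

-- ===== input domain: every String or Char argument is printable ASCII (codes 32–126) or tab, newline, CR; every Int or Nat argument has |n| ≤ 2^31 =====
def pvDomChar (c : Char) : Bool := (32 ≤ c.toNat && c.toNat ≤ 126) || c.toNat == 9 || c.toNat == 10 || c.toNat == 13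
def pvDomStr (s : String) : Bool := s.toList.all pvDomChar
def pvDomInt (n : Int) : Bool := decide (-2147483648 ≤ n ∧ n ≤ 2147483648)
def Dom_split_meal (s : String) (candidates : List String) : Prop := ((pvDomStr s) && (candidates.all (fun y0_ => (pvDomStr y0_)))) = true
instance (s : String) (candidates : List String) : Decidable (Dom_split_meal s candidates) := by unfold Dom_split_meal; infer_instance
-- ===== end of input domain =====

-- B replaces A's tree recursion with an explicit-stack DFS loop producing the same leaves in order (objective: alternative).

-- ===== PORT A =====
-- the candidate scan both Pythons share: first c in cs with seg.lower().find(c) > 0, returning that index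
def firstSplit (cs : List String) (low : List Char) : Option Nat :=
  match cs with
  | [] => none
  | c :: rest =>
    let i := PySem.Chars.find low c.toList
    if 0 < i then some i.toNat else firstSplit rest low

-- needed by the ports' termination proofs (cited in decreasing_by)
lemma firstSplit_lt {cs : List String} {low : List Char} {i : Nat}
    (h : firstSplit cs low = some i) : 0 < i ∧ i < low.length := by
  induction cs with
  | nil => simp [firstSplit] at h
  | cons c rest ih =>
    simp only [firstSplit] at h
    split at h
    · rename_i hpos
      cases h
      have hnn : 0 ≤ PySem.Chars.find low c.toList := le_of_lt hpos
      obtain ⟨hpre, hmin⟩ := PySem.Chars.find_spec hnn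
      have hne : c.toList ≠ [] := by
        intro hnil
        exact hmin 0 (by omega) (by simp [hnil])
      have hlen := hpre.length_le
      simp only [List.length_drop] at hlen
      have : 1 ≤ c.toList.length := List.length_pos_iff.mpr hne
      omega
    · exact ih h

lemma pow3_split {i L : Nat} (h0 : 0 < i) (hL : i < L) : 3 ^ i + 3 ^ (L - i) + 1 < 3 ^ L := by
  have h1 : 3 ^ i ≤ 3 ^ (L - 1) := Nat.pow_le_pow_right (by norm_num) (by omega)
  have h2 : 3 ^ (L - i) ≤ 3 ^ (L - 1) := Nat.pow_le_pow_right (by norm_num) (by omega)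
  have h3 : (3:Nat) ≤ 3 ^ (L - 1) := by
    calc (3:Nat) = 3 ^ 1 := by norm_num
    _ ≤ 3 ^ (L - 1) := Nat.pow_le_pow_right (by norm_num) (by omega)
  have h4 : 3 ^ L = 3 ^ (L - 1) * 3 := by
    rw [← pow_succ]; congr 1; omega
  omega

-- s[:i] / s[i:] with 0 ≤ i ≤ len(s) are exactly take/drop on the character list
def split_meal_core (cs : List String) (l : List Char) : List String :=
  match h : firstSplit cs (PySem.Chars.lower l) with
  | some i => split_meal_core cs (l.take i) ++ split_meal_core cs (l.drop i)
  | none => [String.ofList l]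
termination_by l.length
decreasing_by
  · have := firstSplit_lt h
    simp only [PySem.Chars.lower, List.length_map] at this
    simp only [List.length_take]
    omega
  · have := firstSplit_lt h
    simp only [PySem.Chars.lower, List.length_map] at this
    simp only [List.length_drop]
    omega

def split_meal (s : String) (candidates : List String) : List String :=
  split_meal_core candidates s.toList

-- ===== PORT B =====
-- stack head = Python stack's top (list end, where append/pop act)
def altLoop (cs : List String) (stack : List (List Char)) (result : List String) : List String :=
  match stack with
  | [] => result
  | seg :: rest =>
    match h : firstSplit cs (PySem.Chars.lower seg) with
    | some i => altLoop cs (seg.take i :: seg.drop i :: rest) result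
    | none => altLoop cs rest (result ++ [String.ofList seg])
termination_by (stack.map (fun l => 3 ^ l.length + 1)).sum
decreasing_by
  · have := firstSplit_lt h
    simp only [PySem.Chars.lower, List.length_map] at this
    simp only [List.map_cons, List.sum_cons, List.length_take, List.length_drop]
    have hmin : min i seg.length = i := by omega
    rw [hmin]
    have := pow3_split this.1 this.2
    omega
  · simp only [List.map_cons, List.sum_cons]
    have : 0 < 3 ^ seg.length + 1 := by positivity
    omega

def split_meal_alt (s : String) (candidates : List String) : List String :=
  altLoop candidates [s.toList] []

-- ===== PRECONDITION & SPEC =====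
def Spec_split_meal (s : String) (candidates : List String) (out : List String) : Prop := out = split_meal_alt s candidates
instance (s : String) (candidates : List String) (out : List String) : Decidable (Spec_split_meal s candidates out) := by unfold Spec_split_meal; infer_instance

-- ===== CLAIM (what is proved, stated in full; the proofs are below) =====
def Claim_equal_split_meal : Prop := ∀ (s : String) (candidates : List String), Dom_split_meal s candidates → Spec_split_meal s candidates (split_meal s candidates)

-- ===== LEMMAS AND PROOFS =====

-- unfolding lemmas for A's dependent match
lemma core_some {cs : List String} {l : List Char} {i : Nat}
    (h : firstSplit cs (PySem.Chars.lower l) = some i) :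
    split_meal_core cs l = split_meal_core cs (l.take i) ++ split_meal_core cs (l.drop i) := by
  rw [split_meal_core.eq_def]
  split
  next i2 h2 => rw [h] at h2; injection h2 with h3; subst h3; rfl
  next h2 => rw [h] at h2; cases h2

lemma core_none {cs : List String} {l : List Char}
    (h : firstSplit cs (PySem.Chars.lower l) = none) :
    split_meal_core cs l = [String.ofList l] := by
  rw [split_meal_core.eq_def]
  split
  next i2 h2 => rw [h] at h2; cases h2
  next h2 => rfl

-- B's loop invariant: the loop returns the accumulated leaves followed by A's leaves of every stacked segment
lemma altLoop_eq (cs : List String) (stack : List (List Char)) (result : List String) :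
    altLoop cs stack result = result ++ (stack.map (split_meal_core cs)).flatten := by
  induction stack, result using altLoop.induct cs with
  | case1 result => simp [altLoop]
  | case2 seg rest result i h ih =>
    rw [altLoop.eq_def]
    split
    next hx => cases hx
    next c cstack heq =>
      injection heq with h1 h2
      subst h1; subst h2
      split
      next i2 h2 =>
        rw [h] at h2; injection h2 with h3; subst h3
        rw [ih]
        simp [core_some h]
      next h2 => rw [h] at h2; cases h2
  | case3 seg rest result h ih =>
    rw [altLoop.eq_def]
    split
    next hx => cases hx
    next c cstack heq =>
      injection heq with h1 h2
      subst h1; subst h2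
      split
      next i2 h2 => rw [h] at h2; cases h2
      next h2 =>
        rw [ih]
        simp [core_none h]

-- ===== VERDICT (by name: the statement is the Claim_ definition above) =====
theorem split_meal_spec : Claim_equal_split_meal := by
  intro s candidates _
  unfold Spec_split_meal split_meal split_meal_alt
  rw [altLoop_eq]
  simp
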